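-- pv_equiv track=rewrite | github.com/ymlsmile/icme1 | finalresult.py | tolabel
-- ===== SOURCE A (Python) =====
-- def tolabel(result):
--     label=[]
--     temp=result[0]
--     index=2
--     start=1
--     for item in result[1:]:
--         if item!=temp:
--             if temp!=0:
--                 label.append([temp,start,index-1])
--             temp=item
--             start=index
--             index+=1
--         else:
--             index+=1
--
--     #3/31 add
--     label2=[]
--     i=0
--     while i<len(label):
--         j=i+1
--         while j<len(label) and label[j][0]==label[i][0] :
--             j+=1
--         if(j==i+1):
--             label2.append(label[i])
--         else:
--             label2.append([label[i][0],label[i][1],label[j-1][-1]])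
--
--         i=j
--
--
--     return label2
-- ===== SOURCE B (Python) =====
-- def _push(label2, temp, start, end):
--     # append a run, merging into the last run when it has the same label
--     if label2 and label2[-1][0] == temp:
--         label2[-1][2] = end
--     else:
--         label2.append([temp, start, end])
--
-- def tolabel(result):
--     label2 = []
--     temp = result[0]
--     index = 2
--     start = 1
--     for item in result[1:]:
--         if item != temp:
--             if temp != 0:
--                 _push(label2, temp, start, index - 1)
--             temp = item
--             start = index
--         index += 1
--     return label2
-- ===== Notes on version B (the rewrite author's own statement) =====
-- stated objective: simpler
-- what changed: B fuses A's two passes into one: instead of collecting all nonzero runs in a list and then merging adjacent equal-label runs with a nested index/while scan, B emits each finishing run directly into the output, extending the last output run in place when it carries the same label.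
import Mathlib
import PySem

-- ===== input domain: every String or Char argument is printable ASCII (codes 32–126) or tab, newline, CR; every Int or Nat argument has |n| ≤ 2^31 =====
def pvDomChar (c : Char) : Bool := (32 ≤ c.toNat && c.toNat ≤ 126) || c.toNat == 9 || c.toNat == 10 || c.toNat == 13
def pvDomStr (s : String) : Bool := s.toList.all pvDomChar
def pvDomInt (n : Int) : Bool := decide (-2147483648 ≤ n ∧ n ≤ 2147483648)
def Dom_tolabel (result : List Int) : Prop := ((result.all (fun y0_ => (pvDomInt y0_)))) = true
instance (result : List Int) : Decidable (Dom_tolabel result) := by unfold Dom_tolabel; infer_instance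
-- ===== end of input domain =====

-- B fuses A's run-collection pass and adjacent-equal-run merge pass into one pass that merges on the fly; same return value (A's in-place list mutation of its local lists is not observable).


-- ===== PORT A =====
-- label2[j][0] etc.: the inner lists always have length 3 and are indexed in range,
-- so the `.getD 0` total form is exact here.
def pyAt (xs : List Int) (i : Int) : Int := (PySem.List.pyGet? xs i).getD 0

-- A's first pass loop body; state = (label, temp, index, start)
def stepA (st : List (List Int) × Int × Int × Int) (item : Int) : List (List Int) × Int × Int × Int :=
  let (label, temp, index, start) := st
  if item ≠ temp then
    ((if temp ≠ 0 then label ++ [[temp, start, index - 1]] else label), item, index + 1, index)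
  else
    (label, temp, index + 1, start)

-- A's inner while: splits off the leading entries whose [0] equals v (j scans forward)
def spanSame (v : Int) : List (List Int) → List (List Int) × List (List Int)
  | [] => ([], [])
  | f :: rest =>
    if pyAt f 0 = v then
      let p := spanSame v rest
      (f :: p.1, p.2)
    else
      ([], f :: rest)

theorem spanSame_snd_len (v : Int) (L : List (List Int)) : (spanSame v L).2.length ≤ L.length := by
  induction L with
  | nil => simp [spanSame]
  | cons f rest ih =>
    simp only [spanSame]
    split
    · simpa using Nat.le_succ_of_le ih
    · simp

-- A's outer while over label (i jumps to j); appends label[i] itself when the block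
-- is a single run, else the merged triple [label[i][0], label[i][1], label[j-1][-1]]
def mergeA : List (List Int) → List (List Int)
  | [] => []
  | e :: rest =>
    let p := spanSame (pyAt e 0) rest
    (if p.1 = [] then e else [pyAt e 0, pyAt e 1, pyAt (p.1.getLastD e) (-1)]) :: mergeA p.2
termination_by L => L.length
decreasing_by
  simpa using Nat.lt_succ_of_le (spanSame_snd_len (pyAt e 0) rest)

def tolabel (result : List Int) : List (List Int) :=
  -- temp = result[0] (IndexError on []: excluded by Pre_); result[1:] = drop 1
  let temp := result.headI
  let st := (result.drop 1).foldl stepA ([], temp, 2, 1)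
  mergeA st.1

-- ===== PORT B =====
-- Source B's _push: append [temp,start,stop], merging into the last entry when its label is temp
def pushRun (label2 : List (List Int)) (temp start stop : Int) : List (List Int) :=
  match label2.getLast? with
  | some l =>
    if pyAt l 0 = temp then label2.dropLast ++ [l.set 2 stop]
    else label2 ++ [[temp, start, stop]]
  | none => label2 ++ [[temp, start, stop]]

-- B's loop body; state = (label2, temp, index, start)
def stepB (st : List (List Int) × Int × Int × Int) (item : Int) : List (List Int) × Int × Int × Int :=
  let (label2, temp, index, start) := st
  if item ≠ temp then
    ((if temp ≠ 0 then pushRun label2 temp start (index - 1) else label2), item, index + 1, index)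
  else
    (label2, temp, index + 1, start)

def tolabel_alt (result : List Int) : List (List Int) :=
  let temp := result.headI
  let st := (result.drop 1).foldl stepB ([], temp, 2, 1)
  st.1

-- ===== PRECONDITION & SPEC =====
-- Pre_ excludes only the empty list, on which A (and B) raise IndexError at result[0].
def Pre_tolabel (result : List Int) : Prop := result ≠ []
instance (result : List Int) : Decidable (Pre_tolabel result) := by unfold Pre_tolabel; infer_instance
def pvWitness_tolabel : List Int := [1, 1, 0, 2, 2]

def Spec_tolabel (result : List Int) (out : List (List Int)) : Prop := out = tolabel_alt result
instance (result : List Int) (out : List (List Int)) : Decidable (Spec_tolabel result out) := by unfold Spec_tolabel; infer_instance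

-- ===== CLAIM (what is proved, stated in full; the proofs are below) =====
def Claim_equal_tolabel : Prop := ∀ (result : List Int), Dom_tolabel result → Pre_tolabel result → Spec_tolabel result (tolabel result)

-- ===== LEMMAS AND PROOFS =====

-- entries emitted by pass 1 are triples
def Shaped (L : List (List Int)) : Prop := ∀ e ∈ L, ∃ v s x, e = [v, s, x]

-- pushRun lifted to a run triple
def pushEnt (acc : List (List Int)) (e : List Int) : List (List Int) :=
  pushRun acc (pyAt e 0) (pyAt e 1) (pyAt e 2)

theorem pyAt0 (a b c : Int) : pyAt [a, b, c] 0 = a := by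
  simp [pyAt, PySem.List.pyGet?, PySem.List.pyIdx?]

theorem pyAt1 (a b c : Int) : pyAt [a, b, c] 1 = b := by
  simp [pyAt, PySem.List.pyGet?, PySem.List.pyIdx?]

theorem pyAt2 (a b c : Int) : pyAt [a, b, c] 2 = c := by
  simp [pyAt, PySem.List.pyGet?, PySem.List.pyIdx?]

theorem pyAtNeg1 (a b c : Int) : pyAt [a, b, c] (-1) = c := by
  simp [pyAt, PySem.List.pyGet?_neg_one]

theorem pushEnt_triple (acc : List (List Int)) (v s x : Int) :
    pushEnt acc [v, s, x] = pushRun acc v s x := by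
  simp [pushEnt, pyAt0, pyAt1, pyAt2]

theorem shaped_nil : Shaped [] := by intro e he; cases he

theorem shaped_append (L : List (List Int)) (v s x : Int) (h : Shaped L) :
    Shaped (L ++ [[v, s, x]]) := by
  intro e he
  rcases List.mem_append.1 he with h1 | h1
  · exact h e h1
  · exact ⟨v, s, x, by simpa using h1⟩

theorem shaped_foldl (L : List Int) (label : List (List Int)) (temp index start : Int)
    (h : Shaped label) : Shaped (L.foldl stepA (label, temp, index, start)).1 := by
  induction L generalizing label temp index start with
  | nil => exact h
  | cons item rest ih =>
    simp only [List.foldl_cons, stepA]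
    split
    · split
      · exact ih _ _ _ _ (shaped_append label temp start (index - 1) h)
      · exact ih _ _ _ _ h
    · exact ih _ _ _ _ h

-- pushRun onto a list ending in a same-label run extends that run's end
theorem pushRun_extend (acc : List (List Int)) (v s x s' e' : Int) :
    pushRun (acc ++ [[v, s, x]]) v s' e' = acc ++ [[v, s, e']] := by
  simp [pushRun, List.getLast?_append, pyAt0, List.set]

-- pushRun onto a list ending in a different-label run appends
theorem pushRun_append (acc : List (List Int)) (v s x v' s' e' : Int) (hv : v' ≠ v) :
    pushRun (acc ++ [[v, s, x]]) v' s' e' = (acc ++ [[v, s, x]]) ++ [[v', s', e']] := by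
  simp [pushRun, List.getLast?_append, pyAt0]
  omega

-- B's incremental merge, started on acc ending in a fresh run [v,s,x], equals
-- absorbing the leading equal-label block and then A's mergeA on the remainder.
theorem push_fold_block (L : List (List Int)) (hL : Shaped L) (acc : List (List Int))
    (v s x : Int) :
    L.foldl pushEnt (acc ++ [[v, s, x]]) =
      acc ++ [[v, s, ((spanSame v L).1.getLast?.map (fun l => pyAt l (-1))).getD x]]
        ++ mergeA (spanSame v L).2 := by
  induction L generalizing acc v s x with
  | nil => simp [spanSame, mergeA]
  | cons f rest ih =>
    obtain ⟨v', s', e', rfl⟩ := hL f (by simp)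
    have hrest : Shaped rest := fun e he => hL e (by simp [he])
    by_cases hv : v' = v
    · subst hv
      simp only [List.foldl_cons, pushEnt_triple, pushRun_extend, spanSame, pyAt0]
      rw [ih hrest acc v' s e']
      rcases hsp : (spanSame v' rest).1 with _ | ⟨g, gs⟩
      · simp [pyAtNeg1]
      · rcases hgl : (g :: gs).getLast? with _ | t
        · simp at hgl
        · simp [hgl]
    · simp only [List.foldl_cons, pushEnt_triple, pushRun_append acc v s x v' s' e' hv,
        spanSame, pyAt0, if_neg hv]
      rw [ih hrest (acc ++ [[v, s, x]]) v' s' e']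
      have hm : mergeA ([v', s', e'] :: rest) =
          (if (spanSame v' rest).1 = [] then [v', s', e']
            else [v', s', pyAt ((spanSame v' rest).1.getLastD [v', s', e']) (-1)])
            :: mergeA (spanSame v' rest).2 := by
        rw [mergeA]
        simp [pyAt0, pyAt1]
      rw [hm]
      rcases hsp : (spanSame v' rest).1 with _ | ⟨g, gs⟩
      · simp
      · rcases hgl : (g :: gs).getLast? with _ | t
        · simp at hgl
        · simp [hgl, List.getLastD_eq_getLast?]

theorem mergeA_eq_foldl_push (L : List (List Int)) (hL : Shaped L) :
    mergeA L = L.foldl pushEnt [] := by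
  cases L with
  | nil => simp [mergeA]
  | cons e rest =>
    obtain ⟨v, s, x, rfl⟩ := hL e (by simp)
    have hrest : Shaped rest := fun f hf => hL f (by simp [hf])
    have hstep : pushEnt [] [v, s, x] = [] ++ [[v, s, x]] := by
      simp [pushEnt_triple, pushRun]
    rw [List.foldl_cons, hstep, push_fold_block rest hrest [] v s x, mergeA]
    simp only [pyAt0, pyAt1, List.nil_append]
    rcases hsp : (spanSame v rest).1 with _ | ⟨g, gs⟩
    · simp
    · rcases hgl : (g :: gs).getLast? with _ | t
      · simp at hgl
      · simp [hgl, List.getLastD_eq_getLast?]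

-- B's running label2 tracks the incremental merge of A's running label
theorem fold_inv (L : List Int) (label : List (List Int)) (temp index start : Int) :
    (L.foldl stepB (label.foldl pushEnt [], temp, index, start)).1 =
      (L.foldl stepA (label, temp, index, start)).1.foldl pushEnt [] := by
  induction L generalizing label temp index start with
  | nil => rfl
  | cons item rest ih =>
    simp only [List.foldl_cons, stepA, stepB]
    split
    · split
      · have hpush : pushRun (label.foldl pushEnt []) temp start (index - 1) =
            (label ++ [[temp, start, index - 1]]).foldl pushEnt [] := by
          rw [List.foldl_append]
          simp [pushEnt_triple]
        rw [hpush, ih]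
      · exact ih _ _ _ _
    · exact ih _ _ _ _

-- ===== VERDICT (by name: the statement is the Claim_ definition above) =====
theorem tolabel_spec : Claim_equal_tolabel := by
  intro result _ _
  show tolabel result = tolabel_alt result
  unfold tolabel tolabel_alt
  have h := fold_inv (result.drop 1) [] result.headI 2 1
  simp only [List.foldl_nil] at h
  rw [h, mergeA_eq_foldl_push _ (shaped_foldl _ [] _ _ _ shaped_nil)]
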